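-- pv_equiv track=rewrite | github.com/digitaljohnny/Moltbot | skills/golf-course-research/classify-course-type.py | classify_land_type
-- ===== SOURCE A (Python) =====
-- from typing import Dict, List, Optional, Tuple
--
-- def classify_land_type(
--     description: Optional[str] = None,
--     location_info: Optional[str] = None,
--     images_info: Optional[str] = None
-- ) -> Optional[str]:
--     """
--     Classify land type based on description, location, and visual information.
--
--     Returns:
--         Land type key or None if cannot be determined
--     """
--     text = " ".join([
--         description or "",
--         location_info or "",
--         images_info or ""
--     ]).lower()
--
--     # Links (coastal, sandy)
--     if any(word in text for word in ["links", "coastal", "dunes", "sandy", "seaside", "ocean", "beach"]):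
--         if "inland" in text or "style" in text:
--             return "links-style"
--         return "links"
--
--     # Parkland
--     if any(word in text for word in ["parkland", "tree-lined", "trees", "lush", "manicured", "inland"]):
--         return "parkland"
--
--     # Heathland
--     if any(word in text for word in ["heathland", "heather", "gorse", "sandy soil"]):
--         return "heathland"
--
--     # Moorland
--     if any(word in text for word in ["moorland", "moor", "upland", "windswept", "elevation"]):
--         return "moorland"
--
--     # Woodland
--     if any(word in text for word in ["woodland", "wooded", "forest", "dense trees", "tight"]):
--         return "woodland"
--
--     # Desert
--     if any(word in text for word in ["desert", "arid", "cactus", "arizona", "nevada", "dunes"]):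
--         return "desert"
--
--     # Mountain/Alpine
--     if any(word in text for word in ["mountain", "alpine", "elevation change", "sloped", "hills", "peaks"]):
--         return "mountain"
--
--     # Coastal cliff
--     if any(word in text for word in ["cliff", "headland", "bluff", "coastal cliff"]):
--         return "coastal-cliff"
--
--     # Tropical/Jungle
--     if any(word in text for word in ["tropical", "jungle", "rainforest", "palm", "hawaii", "caribbean"]):
--         return "tropical"
--
--     # Wetland/Marsh
--     if any(word in text for word in ["wetland", "marsh", "swamp", "water systems"]):
--         return "wetland"
--
--     # Volcanic
--     if any(word in text for word in ["volcanic", "lava", "lava field", "volcano"]):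
--         return "volcanic"
--
--     # Island
--     if any(word in text for word in ["island", "offshore", "water-separated"]):
--         return "island"
--
--     # Sandbelt
--     if any(word in text for word in ["sandbelt", "sand belt", "melbourne", "firm conditions", "distinct bunker"]):
--         return "sandbelt"
--
--     return None
-- ===== SOURCE B (Python) =====
-- from typing import Optional
--
-- _GROUPS = [
--     (("links", "coastal", "dunes", "sandy", "seaside", "ocean", "beach"), "links"),
--     (("parkland", "tree-lined", "trees", "lush", "manicured", "inland"), "parkland"),
--     (("heathland", "heather", "gorse", "sandy soil"), "heathland"),
--     (("moorland", "moor", "upland", "windswept", "elevation"), "moorland"),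
--     (("woodland", "wooded", "forest", "dense trees", "tight"), "woodland"),
--     (("desert", "arid", "cactus", "arizona", "nevada", "dunes"), "desert"),
--     (("mountain", "alpine", "elevation change", "sloped", "hills", "peaks"), "mountain"),
--     (("cliff", "headland", "bluff", "coastal cliff"), "coastal-cliff"),
--     (("tropical", "jungle", "rainforest", "palm", "hawaii", "caribbean"), "tropical"),
--     (("wetland", "marsh", "swamp", "water systems"), "wetland"),
--     (("volcanic", "lava", "lava field", "volcano"), "volcanic"),
--     (("island", "offshore", "water-separated"), "island"),
--     (("sandbelt", "sand belt", "melbourne", "firm conditions", "distinct bunker"), "sandbelt"),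
-- ]
--
-- # one flat keyword-level index: (priority rank, label, keyword)
-- _ENTRIES = [(rank, label, word)
--             for rank, (words, label) in enumerate(_GROUPS)
--             for word in words]
--
--
-- def classify_land_type(description=None, location_info=None, images_info=None):
--     text = " ".join([description or "", location_info or "", images_info or ""]).lower()
--     # collect ALL matching keywords, then take the best (lowest-rank) match
--     hits = [(rank, label) for rank, label, word in _ENTRIES if word in text]
--     if not hits:
--         return None
--     _, label = min(hits, key=lambda h: h[0])
--     if label == "links" and ("inland" in text or "style" in text):
--         return "links-style"
--     return label
-- ===== Notes on version B (the rewrite author's own statement) =====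
-- stated objective: alternative
-- what changed: Instead of a short-circuiting chain of per-group checks, B flattens the keywords into one (rank, label, keyword) index, collects ALL matching keywords in a single comprehension, and returns the label of the minimum-rank hit (links-style sub-variant applied after the argmin).
import Mathlib
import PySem

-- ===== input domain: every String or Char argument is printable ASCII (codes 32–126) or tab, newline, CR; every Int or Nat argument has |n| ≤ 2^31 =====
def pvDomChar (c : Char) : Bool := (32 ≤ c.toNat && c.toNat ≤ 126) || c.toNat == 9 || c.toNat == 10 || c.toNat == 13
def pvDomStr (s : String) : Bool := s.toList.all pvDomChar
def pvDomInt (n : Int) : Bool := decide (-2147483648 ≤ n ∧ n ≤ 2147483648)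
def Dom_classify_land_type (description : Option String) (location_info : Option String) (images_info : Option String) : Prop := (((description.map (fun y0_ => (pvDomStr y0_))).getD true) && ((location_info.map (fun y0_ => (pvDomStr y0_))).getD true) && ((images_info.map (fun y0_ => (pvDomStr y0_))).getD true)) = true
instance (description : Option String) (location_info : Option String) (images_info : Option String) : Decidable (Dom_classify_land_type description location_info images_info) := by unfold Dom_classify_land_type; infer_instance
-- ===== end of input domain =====

-- B replaces A's short-circuiting chain of per-group checks by a flat (rank,label,keyword)
-- index: collect all matching keywords in one pass, then take the minimum-rank hit
-- (objective: alternative; same asymptotic cost).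


-- ===== PORT A =====
-- literal transliteration: text = " ".join([d or "", l or "", i or ""]).lower(); then the
-- chain of `any(word in text …)` if-blocks in A's order.
def classify_land_type (description : Option String) (location_info : Option String) (images_info : Option String) : Option String :=
  let text := PySem.Str.lower (PySem.Str.join " " [description.getD "", location_info.getD "", images_info.getD ""])
  if (["links", "coastal", "dunes", "sandy", "seaside", "ocean", "beach"].any (fun word => PySem.Str.isIn word text)) then
    (if PySem.Str.isIn "inland" text || PySem.Str.isIn "style" text then some "links-style" else some "links")
  else if (["parkland", "tree-lined", "trees", "lush", "manicured", "inland"].any (fun word => PySem.Str.isIn word text)) then some "parkland"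
  else if (["heathland", "heather", "gorse", "sandy soil"].any (fun word => PySem.Str.isIn word text)) then some "heathland"
  else if (["moorland", "moor", "upland", "windswept", "elevation"].any (fun word => PySem.Str.isIn word text)) then some "moorland"
  else if (["woodland", "wooded", "forest", "dense trees", "tight"].any (fun word => PySem.Str.isIn word text)) then some "woodland"
  else if (["desert", "arid", "cactus", "arizona", "nevada", "dunes"].any (fun word => PySem.Str.isIn word text)) then some "desert"
  else if (["mountain", "alpine", "elevation change", "sloped", "hills", "peaks"].any (fun word => PySem.Str.isIn word text)) then some "mountain"
  else if (["cliff", "headland", "bluff", "coastal cliff"].any (fun word => PySem.Str.isIn word text)) then some "coastal-cliff"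
  else if (["tropical", "jungle", "rainforest", "palm", "hawaii", "caribbean"].any (fun word => PySem.Str.isIn word text)) then some "tropical"
  else if (["wetland", "marsh", "swamp", "water systems"].any (fun word => PySem.Str.isIn word text)) then some "wetland"
  else if (["volcanic", "lava", "lava field", "volcano"].any (fun word => PySem.Str.isIn word text)) then some "volcanic"
  else if (["island", "offshore", "water-separated"].any (fun word => PySem.Str.isIn word text)) then some "island"
  else if (["sandbelt", "sand belt", "melbourne", "firm conditions", "distinct bunker"].any (fun word => PySem.Str.isIn word text)) then some "sandbelt"
  else none

-- ===== PORT B =====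
-- Source B's _GROUPS table
def landGroups : List (List String × String) :=
  [ (["links", "coastal", "dunes", "sandy", "seaside", "ocean", "beach"], "links"),
    (["parkland", "tree-lined", "trees", "lush", "manicured", "inland"], "parkland"),
    (["heathland", "heather", "gorse", "sandy soil"], "heathland"),
    (["moorland", "moor", "upland", "windswept", "elevation"], "moorland"),
    (["woodland", "wooded", "forest", "dense trees", "tight"], "woodland"),
    (["desert", "arid", "cactus", "arizona", "nevada", "dunes"], "desert"),
    (["mountain", "alpine", "elevation change", "sloped", "hills", "peaks"], "mountain"),
    (["cliff", "headland", "bluff", "coastal cliff"], "coastal-cliff"),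
    (["tropical", "jungle", "rainforest", "palm", "hawaii", "caribbean"], "tropical"),
    (["wetland", "marsh", "swamp", "water systems"], "wetland"),
    (["volcanic", "lava", "lava field", "volcano"], "volcanic"),
    (["island", "offshore", "water-separated"], "island"),
    (["sandbelt", "sand belt", "melbourne", "firm conditions", "distinct bunker"], "sandbelt") ]

-- Source B's _ENTRIES comprehension: enumerate the groups, one (rank, label, keyword) per keyword
def landFlat : Nat → List (List String × String) → List (Nat × String × String)
  | _, [] => []
  | i, (ws, l) :: rest => ws.map (fun w => (i, l, w)) ++ landFlat (i + 1) rest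

def landEntries : List (Nat × String × String) := landFlat 0 landGroups

def classify_land_type_alt (description : Option String) (location_info : Option String) (images_info : Option String) : Option String :=
  let text := PySem.Str.lower (PySem.Str.join " " [description.getD "", location_info.getD "", images_info.getD ""])
  -- hits = [(rank, label) for rank, label, word in _ENTRIES if word in text]
  let hits := landEntries.filterMap (fun e => if PySem.Str.isIn e.2.2 text then some (e.1, e.2.1) else none)
  match hits with
  | [] => none
  | h :: t =>
    -- min(hits, key=lambda h: h[0]) — first minimal-rank hit
    let best := t.foldl (fun acc x => if x.1 < acc.1 then x else acc) h
    if best.2 == "links" && (PySem.Str.isIn "inland" text || PySem.Str.isIn "style" text) then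
      some "links-style"
    else some best.2

-- ===== PRECONDITION & SPEC =====
def Spec_classify_land_type (description : Option String) (location_info : Option String) (images_info : Option String) (out : Option String) : Prop := out = classify_land_type_alt description location_info images_info
instance (description : Option String) (location_info : Option String) (images_info : Option String) (out : Option String) : Decidable (Spec_classify_land_type description location_info images_info out) := by unfold Spec_classify_land_type; infer_instance

-- ===== CLAIM (what is proved, stated in full; the proofs are below) =====
def Claim_equal_classify_land_type : Prop := ∀ (description : Option String) (location_info : Option String) (images_info : Option String), Dom_classify_land_type description location_info images_info → Spec_classify_land_type description location_info images_info (classify_land_type description location_info images_info)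

-- ===== LEMMAS AND PROOFS =====

-- abstract form of A's chain: first group with a matching keyword wins
def firstMatch (text : String) : List (List String × String) → Option String
  | [] => none
  | (ws, l) :: rest => if ws.any (fun w => PySem.Str.isIn w text) then some l else firstMatch text rest

-- abstract form of B's min step
def pickMin (hits : List (Nat × String)) : Option (Nat × String) :=
  match hits with
  | [] => none
  | h :: t => some (t.foldl (fun acc x => if x.1 < acc.1 then x else acc) h)

def hitsOf (text : String) (es : List (Nat × String × String)) : List (Nat × String) :=
  es.filterMap (fun e => if PySem.Str.isIn e.2.2 text then some (e.1, e.2.1) else none)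

lemma foldl_min_fixed (i : Nat) (l : String) :
    ∀ (zs : List (Nat × String)), (∀ z ∈ zs, ¬ z.1 < i) →
      zs.foldl (fun acc x => if x.1 < acc.1 then x else acc) (i, l) = (i, l) := by
  intro zs
  induction zs with
  | nil => intro _; rfl
  | cons z t ih =>
    intro h
    have hz : ¬ z.1 < i := h z (List.mem_cons_self)
    simp only [List.foldl_cons, if_neg hz]
    exact ih (fun w hw => h w (List.mem_cons_of_mem _ hw))

lemma hitsOf_append (text : String) (xs ys : List (Nat × String × String)) :
    hitsOf text (xs ++ ys) = hitsOf text xs ++ hitsOf text ys := by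
  simp [hitsOf]

lemma hitsOf_group (text : String) (i : Nat) (l : String) (ws : List String) :
    ∀ x ∈ hitsOf text (ws.map (fun w => (i, l, w))), x = (i, l) := by
  intro x hx
  simp only [hitsOf, List.filterMap_map] at hx
  rcases List.mem_filterMap.mp hx with ⟨w, _, hw⟩
  simp only [Function.comp] at hw
  split at hw
  · exact (Option.some.injEq _ _ ▸ hw).symm
  · exact absurd hw (by simp)

lemma hitsOf_group_nil_iff (text : String) (i : Nat) (l : String) (ws : List String) :
    hitsOf text (ws.map (fun w => (i, l, w))) = [] ↔ ws.any (fun w => PySem.Str.isIn w text) = false := by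
  simp only [hitsOf, List.filterMap_map, List.filterMap_eq_nil_iff]
  constructor
  · intro h
    rw [List.any_eq_false]
    intro w hw
    have := h w hw
    simp only [Function.comp] at this
    by_cases hc : PySem.Str.isIn w text = true
    · rw [if_pos hc] at this; exact absurd this (by simp)
    · simpa using hc
  · intro h w hw
    have hc : ¬ PySem.Str.isIn w text = true := by
      rw [List.any_eq_false] at h
      simpa using h w hw
    simp only [Function.comp]
    rw [if_neg hc]

lemma hitsOf_rank_ge (text : String) :
    ∀ (table : List (List String × String)) (i : Nat),
      ∀ x ∈ hitsOf text (landFlat i table), i ≤ x.1 := by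
  intro table
  induction table with
  | nil => intro i x hx; simp [landFlat, hitsOf] at hx
  | cons g rest ih =>
    intro i x hx
    obtain ⟨ws, l⟩ := g
    rw [landFlat, hitsOf_append] at hx
    rcases List.mem_append.mp hx with h | h
    · rw [hitsOf_group text i l ws x h]
    · exact Nat.le_of_succ_le (ih (i + 1) x h)

lemma pickMin_split (i : Nat) (l : String) (xs ys : List (Nat × String))
    (hxs : ∀ x ∈ xs, x = (i, l)) (hys : ∀ y ∈ ys, i < y.1) :
    pickMin (xs ++ ys) = if xs = [] then pickMin ys else some (i, l) := by
  cases xs with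
  | nil => simp
  | cons h t =>
    have hh : h = (i, l) := hxs h List.mem_cons_self
    simp only [List.cons_append, pickMin, if_neg (List.cons_ne_nil h t)]
    rw [hh]
    congr 1
    apply foldl_min_fixed
    intro z hz
    rcases List.mem_append.mp hz with hz | hz
    · rw [hxs z (List.mem_cons_of_mem _ hz)]; omega
    · have := hys z hz; omega

lemma pickMin_eq_firstMatch (text : String) :
    ∀ (table : List (List String × String)) (i : Nat),
      (pickMin (hitsOf text (landFlat i table))).map Prod.snd = firstMatch text table := by
  intro table
  induction table with
  | nil => intro i; simp [landFlat, hitsOf, pickMin, firstMatch]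
  | cons g rest ih =>
    intro i
    obtain ⟨ws, l⟩ := g
    rw [landFlat, hitsOf_append]
    rw [pickMin_split i l _ _ (hitsOf_group text i l ws)
      (fun y hy => Nat.lt_of_succ_le (hitsOf_rank_ge text rest (i + 1) y hy))]
    cases hb : ws.any (fun w => PySem.Str.isIn w text) with
    | true =>
      have hne : ¬ hitsOf text (ws.map (fun w => (i, l, w))) = [] := by
        rw [hitsOf_group_nil_iff, hb]
        simp
      rw [if_neg hne]
      simp only [firstMatch]
      rw [if_pos hb]
      rfl
    | false =>
      have hnil : hitsOf text (ws.map (fun w => (i, l, w))) = [] := by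
        rw [hitsOf_group_nil_iff]
        exact hb
      rw [if_pos hnil, ih (i + 1)]
      simp only [firstMatch]
      rw [if_neg (by rw [hb]; simp)]

-- A's literal chain equals firstMatch over the group table, with the links-style
-- post-processing applied afterwards
set_option maxHeartbeats 2000000 in
lemma chain_eq_firstMatch (text : String) :
    (if (["links", "coastal", "dunes", "sandy", "seaside", "ocean", "beach"].any (fun word => PySem.Str.isIn word text)) then
      (if PySem.Str.isIn "inland" text || PySem.Str.isIn "style" text then some "links-style" else some "links")
    else if (["parkland", "tree-lined", "trees", "lush", "manicured", "inland"].any (fun word => PySem.Str.isIn word text)) then some "parkland"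
    else if (["heathland", "heather", "gorse", "sandy soil"].any (fun word => PySem.Str.isIn word text)) then some "heathland"
    else if (["moorland", "moor", "upland", "windswept", "elevation"].any (fun word => PySem.Str.isIn word text)) then some "moorland"
    else if (["woodland", "wooded", "forest", "dense trees", "tight"].any (fun word => PySem.Str.isIn word text)) then some "woodland"
    else if (["desert", "arid", "cactus", "arizona", "nevada", "dunes"].any (fun word => PySem.Str.isIn word text)) then some "desert"
    else if (["mountain", "alpine", "elevation change", "sloped", "hills", "peaks"].any (fun word => PySem.Str.isIn word text)) then some "mountain"
    else if (["cliff", "headland", "bluff", "coastal cliff"].any (fun word => PySem.Str.isIn word text)) then some "coastal-cliff"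
    else if (["tropical", "jungle", "rainforest", "palm", "hawaii", "caribbean"].any (fun word => PySem.Str.isIn word text)) then some "tropical"
    else if (["wetland", "marsh", "swamp", "water systems"].any (fun word => PySem.Str.isIn word text)) then some "wetland"
    else if (["volcanic", "lava", "lava field", "volcano"].any (fun word => PySem.Str.isIn word text)) then some "volcanic"
    else if (["island", "offshore", "water-separated"].any (fun word => PySem.Str.isIn word text)) then some "island"
    else if (["sandbelt", "sand belt", "melbourne", "firm conditions", "distinct bunker"].any (fun word => PySem.Str.isIn word text)) then some "sandbelt"
    else none) =
    (match firstMatch text landGroups with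
     | none => none
     | some l => if l == "links" && (PySem.Str.isIn "inland" text || PySem.Str.isIn "style" text) then some "links-style" else some l) := by
  simp only [landGroups, firstMatch]
  by_cases h1 : (["links", "coastal", "dunes", "sandy", "seaside", "ocean", "beach"].any (fun word => PySem.Str.isIn word text)) = true
  · simp only [if_pos h1]; simp
  simp only [if_neg h1]
  by_cases h2 : (["parkland", "tree-lined", "trees", "lush", "manicured", "inland"].any (fun word => PySem.Str.isIn word text)) = true
  · simp only [if_pos h2]; simp
  simp only [if_neg h2]
  by_cases h3 : (["heathland", "heather", "gorse", "sandy soil"].any (fun word => PySem.Str.isIn word text)) = true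
  · simp only [if_pos h3]; simp
  simp only [if_neg h3]
  by_cases h4 : (["moorland", "moor", "upland", "windswept", "elevation"].any (fun word => PySem.Str.isIn word text)) = true
  · simp only [if_pos h4]; simp
  simp only [if_neg h4]
  by_cases h5 : (["woodland", "wooded", "forest", "dense trees", "tight"].any (fun word => PySem.Str.isIn word text)) = true
  · simp only [if_pos h5]; simp
  simp only [if_neg h5]
  by_cases h6 : (["desert", "arid", "cactus", "arizona", "nevada", "dunes"].any (fun word => PySem.Str.isIn word text)) = true
  · simp only [if_pos h6]; simp
  simp only [if_neg h6]
  by_cases h7 : (["mountain", "alpine", "elevation change", "sloped", "hills", "peaks"].any (fun word => PySem.Str.isIn word text)) = true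
  · simp only [if_pos h7]; simp
  simp only [if_neg h7]
  by_cases h8 : (["cliff", "headland", "bluff", "coastal cliff"].any (fun word => PySem.Str.isIn word text)) = true
  · simp only [if_pos h8]; simp
  simp only [if_neg h8]
  by_cases h9 : (["tropical", "jungle", "rainforest", "palm", "hawaii", "caribbean"].any (fun word => PySem.Str.isIn word text)) = true
  · simp only [if_pos h9]; simp
  simp only [if_neg h9]
  by_cases h10 : (["wetland", "marsh", "swamp", "water systems"].any (fun word => PySem.Str.isIn word text)) = true
  · simp only [if_pos h10]; simp
  simp only [if_neg h10]
  by_cases h11 : (["volcanic", "lava", "lava field", "volcano"].any (fun word => PySem.Str.isIn word text)) = true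
  · simp only [if_pos h11]; simp
  simp only [if_neg h11]
  by_cases h12 : (["island", "offshore", "water-separated"].any (fun word => PySem.Str.isIn word text)) = true
  · simp only [if_pos h12]; simp
  simp only [if_neg h12]
  by_cases h13 : (["sandbelt", "sand belt", "melbourne", "firm conditions", "distinct bunker"].any (fun word => PySem.Str.isIn word text)) = true
  · simp only [if_pos h13]; simp
  simp only [if_neg h13]

-- ===== VERDICT (by name: the statement is the Claim_ definition above) =====
theorem classify_land_type_spec : Claim_equal_classify_land_type := by
  intro description location_info images_info _
  unfold Spec_classify_land_type classify_land_type classify_land_type_alt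
  set text := PySem.Str.lower (PySem.Str.join " " [description.getD "", location_info.getD "", images_info.getD ""]) with htext
  rw [chain_eq_firstMatch text]
  have hmain := pickMin_eq_firstMatch text landGroups 0
  show (match firstMatch text landGroups with
        | none => none
        | some l => if l == "links" && (PySem.Str.isIn "inland" text || PySem.Str.isIn "style" text) then some "links-style" else some l)
      = _
  cases hp : pickMin (hitsOf text (landFlat 0 landGroups)) with
  | none =>
    rw [hp] at hmain
    simp only [Option.map_none] at hmain
    rw [← hmain]
    have : hitsOf text (landFlat 0 landGroups) = [] := by
      cases hl : hitsOf text (landFlat 0 landGroups) with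
      | nil => rfl
      | cons h t => rw [hl] at hp; simp [pickMin] at hp
    simp only [landEntries]
    rw [show (landFlat 0 landGroups).filterMap
          (fun e => if PySem.Str.isIn e.2.2 text then some (e.1, e.2.1) else none) = hitsOf text (landFlat 0 landGroups) from rfl, this]
  | some best =>
    rw [hp] at hmain
    simp only [Option.map_some] at hmain
    rw [← hmain]
    simp only [landEntries]
    rw [show (landFlat 0 landGroups).filterMap
          (fun e => if PySem.Str.isIn e.2.2 text then some (e.1, e.2.1) else none) = hitsOf text (landFlat 0 landGroups) from rfl]
    cases hl : hitsOf text (landFlat 0 landGroups) with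
    | nil => rw [hl] at hp; simp [pickMin] at hp
    | cons h t =>
      rw [hl] at hp
      simp only [pickMin, Option.some.injEq] at hp
      simp only [← hp]
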